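-- pv_equiv track=rewrite | github.com/rantvalo5-art/scanner- | scanner_bot.py | calc_obv
-- ===== SOURCE A (Python) =====
-- def calc_obv(vols, closes):
--     if len(vols) < 10:
--         return None
--     obv = 0
--     arr = [0]
--     for i in range(1, len(closes)):
--         if closes[i] > closes[i-1]: obv += vols[i]
--         elif closes[i] < closes[i-1]: obv -= vols[i]
--         arr.append(obv)
--     last = arr[-1]
--     prev10 = arr[max(0, len(arr) - 11)]
--     trend = "up" if last > prev10 else "down" if last < prev10 else "flat"
--     return {"trend": trend}
-- ===== SOURCE B (Python) =====
-- def calc_obv(vols, closes):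
--     if len(vols) < 10:
--         return None
--     diff = 0
--     for i in range(max(1, len(closes) - 10), len(closes)):
--         if closes[i] > closes[i-1]:
--             diff += vols[i]
--         elif closes[i] < closes[i-1]:
--             diff -= vols[i]
--     return {"trend": "up" if diff > 0 else "down" if diff < 0 else "flat"}
-- ===== Notes on version B (the rewrite author's own statement) =====
-- stated objective: faster
-- what changed: B drops the full cumulative-OBV array and scans only the last 10-bar window with a single signed accumulator, since the trend depends only on the net OBV change over that window.
import Mathlib
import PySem

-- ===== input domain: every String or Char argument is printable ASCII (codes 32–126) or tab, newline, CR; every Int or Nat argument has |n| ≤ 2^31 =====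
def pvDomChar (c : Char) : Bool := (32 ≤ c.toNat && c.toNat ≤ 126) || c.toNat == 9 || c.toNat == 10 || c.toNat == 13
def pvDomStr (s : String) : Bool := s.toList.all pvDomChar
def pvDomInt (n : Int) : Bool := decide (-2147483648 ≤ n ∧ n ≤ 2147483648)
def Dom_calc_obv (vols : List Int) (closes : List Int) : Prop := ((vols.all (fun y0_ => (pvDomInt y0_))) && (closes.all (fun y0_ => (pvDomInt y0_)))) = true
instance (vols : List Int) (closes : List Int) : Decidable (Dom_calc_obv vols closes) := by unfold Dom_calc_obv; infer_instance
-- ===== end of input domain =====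

-- B replaces A's full cumulative-OBV array by a single accumulator over the last 10-bar window (faster: O(1) window scan vs O(n) array build).

-- ===== PORT A =====
-- vols[i] / closes[i] are ported with pyGetD; inside Pre_calc_obv every such access is in range, so this is exact there.
def calc_obv (vols : List Int) (closes : List Int) : Option (List (String × String)) :=
  if (vols.length : Int) < 10 then none
  else
    let st := (PySem.List.pyRange 1 (closes.length : Int) 1).foldl
      (fun (st : Int × List Int) i =>
        let obv :=
          if PySem.List.pyGetD closes i 0 > PySem.List.pyGetD closes (i-1) 0 then
            st.1 + PySem.List.pyGetD vols i 0
          else if PySem.List.pyGetD closes i 0 < PySem.List.pyGetD closes (i-1) 0 then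
            st.1 - PySem.List.pyGetD vols i 0
          else st.1
        (obv, st.2 ++ [obv])) (0, [0])
    let arr := st.2
    let last := PySem.List.pyGetD arr (-1) 0
    let prev10 := PySem.List.pyGetD arr (max 0 ((arr.length : Int) - 11)) 0
    let trend := if last > prev10 then "up" else if last < prev10 then "down" else "flat"
    some [("trend", trend)]

-- ===== PORT B =====
def calc_obv_alt (vols : List Int) (closes : List Int) : Option (List (String × String)) :=
  if (vols.length : Int) < 10 then none
  else
    let diff := (PySem.List.pyRange (max 1 ((closes.length : Int) - 10)) (closes.length : Int) 1).foldl
      (fun d i =>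
        if PySem.List.pyGetD closes i 0 > PySem.List.pyGetD closes (i-1) 0 then
          d + PySem.List.pyGetD vols i 0
        else if PySem.List.pyGetD closes i 0 < PySem.List.pyGetD closes (i-1) 0 then
          d - PySem.List.pyGetD vols i 0
        else d) 0
    some [("trend", if diff > 0 then "up" else if diff < 0 then "down" else "flat")]

-- ===== PRECONDITION & SPEC =====
-- Pre_ excludes exactly the inputs on which Python A raises IndexError: len(vols) ≥ 10 and some
-- close-to-close change occurs at an index ≥ len(vols).
def Pre_calc_obv (vols : List Int) (closes : List Int) : Prop :=
  vols.length < 10 ∨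
    ∀ i, i < closes.length → 1 ≤ i → closes[i]! ≠ closes[i-1]! → i < vols.length
instance (vols : List Int) (closes : List Int) : Decidable (Pre_calc_obv vols closes) := by
  unfold Pre_calc_obv; infer_instance

def pvWitness_calc_obv : List Int × List Int :=
  ([1,2,3,4,5,6,7,8,9,10], [5,6,4,4,7,1,2,2,9,3])

def Spec_calc_obv (vols : List Int) (closes : List Int) (out : Option (List (String × String))) : Prop := out = calc_obv_alt vols closes
instance (vols : List Int) (closes : List Int) (out : Option (List (String × String))) : Decidable (Spec_calc_obv vols closes out) := by unfold Spec_calc_obv; infer_instance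

-- ===== CLAIM (what is proved, stated in full; the proofs are below) =====
def Claim_equal_calc_obv : Prop := ∀ (vols : List Int) (closes : List Int), Dom_calc_obv vols closes → Pre_calc_obv vols closes → Spec_calc_obv vols closes (calc_obv vols closes)

-- ===== LEMMAS AND PROOFS =====

-- The per-bar OBV contribution.
def pvStep (vols closes : List Int) (i : Int) : Int :=
  if PySem.List.pyGetD closes i 0 > PySem.List.pyGetD closes (i-1) 0 then
    PySem.List.pyGetD vols i 0
  else if PySem.List.pyGetD closes i 0 < PySem.List.pyGetD closes (i-1) 0 then
    - PySem.List.pyGetD vols i 0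
  else 0

theorem foldB_eq (vols closes : List Int) (l : List Int) (d : Int) :
    l.foldl (fun d i =>
        if PySem.List.pyGetD closes i 0 > PySem.List.pyGetD closes (i-1) 0 then
          d + PySem.List.pyGetD vols i 0
        else if PySem.List.pyGetD closes i 0 < PySem.List.pyGetD closes (i-1) 0 then
          d - PySem.List.pyGetD vols i 0
        else d) d
    = d + (l.map (pvStep vols closes)).sum := by
  induction l generalizing d with
  | nil => simp
  | cons a t ih =>
    simp only [List.foldl_cons, List.map_cons, List.sum_cons, ih, pvStep]
    split_ifs <;> ring

-- The partial-sum list A's loop builds behind its accumulator.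
def pvPartials (vols closes : List Int) (o : Int) : List Int → List Int
  | [] => []
  | i :: t => (o + pvStep vols closes i) :: pvPartials vols closes (o + pvStep vols closes i) t

theorem foldA_eq (vols closes : List Int) (l : List Int) (o : Int) (a : List Int) :
    l.foldl (fun (st : Int × List Int) i =>
        let obv :=
          if PySem.List.pyGetD closes i 0 > PySem.List.pyGetD closes (i-1) 0 then
            st.1 + PySem.List.pyGetD vols i 0
          else if PySem.List.pyGetD closes i 0 < PySem.List.pyGetD closes (i-1) 0 then
            st.1 - PySem.List.pyGetD vols i 0
          else st.1
        (obv, st.2 ++ [obv])) (o, a)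
    = (o + (l.map (pvStep vols closes)).sum, a ++ pvPartials vols closes o l) := by
  induction l generalizing o a with
  | nil => simp [pvPartials]
  | cons i t ih =>
    have hstep :
        (if PySem.List.pyGetD closes i 0 > PySem.List.pyGetD closes (i-1) 0 then
            o + PySem.List.pyGetD vols i 0
          else if PySem.List.pyGetD closes i 0 < PySem.List.pyGetD closes (i-1) 0 then
            o - PySem.List.pyGetD vols i 0
          else o) = o + pvStep vols closes i := by
      simp only [pvStep]; split_ifs <;> ring
    simp only [List.foldl_cons, hstep, ih, pvPartials, List.map_cons, List.sum_cons]
    rw [Prod.mk.injEq]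
    exact ⟨by ring, by simp⟩

theorem pvPartials_length (vols closes : List Int) (o : Int) (l : List Int) :
    (pvPartials vols closes o l).length = l.length := by
  induction l generalizing o with
  | nil => rfl
  | cons i t ih => simp [pvPartials, ih]

theorem pvPartials_getD (vols closes : List Int) (o : Int) (l : List Int) (k : Nat)
    (hk : k < l.length) :
    (pvPartials vols closes o l).getD k 0
      = o + ((l.take (k+1)).map (pvStep vols closes)).sum := by
  induction l generalizing o k with
  | nil => simp at hk
  | cons i t ih =>
    cases k with
    | zero => simp [pvPartials]
    | succ k =>
      simp only [pvPartials, List.getD_cons_succ, List.take_succ_cons, List.map_cons,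
        List.sum_cons]
      rw [ih _ k (by simpa using hk)]
      ring

theorem calc_obv_eq_alt (vols closes : List Int) :
    calc_obv vols closes = calc_obv_alt vols closes := by
  unfold calc_obv calc_obv_alt
  by_cases hv : (vols.length : Int) < 10
  · rw [if_pos hv, if_pos hv]
  · rw [if_neg hv, if_neg hv]
    by_cases hc : closes = []
    · subst hc
      simp only [foldA_eq, foldB_eq]
      norm_num [PySem.List.pyRange_one_eq_nil, pvPartials, PySem.List.pyGetD,
        PySem.List.pyIdx?, PySem.List.pyGet?]
    · have hn : 1 ≤ (closes.length : Int) := by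
        have := List.length_pos_iff.mpr hc; omega
      set n : Int := (closes.length : Int) with hndef
      set s : Int := max 1 (n - 10) with hsdef
      have hs1 : 1 ≤ s := le_max_left _ _
      have hsn : s ≤ n := by omega
      have hsplit := PySem.List.pyRange_one_append 1 s n hs1 hsn
      set P := PySem.List.pyRange 1 s 1 with hP
      set Q := PySem.List.pyRange s n 1 with hQ
      have hPlen : P.length = (s - 1).toNat := PySem.List.length_pyRange_one 1 s
      have hQlen : Q.length = (n - s).toNat := PySem.List.length_pyRange_one s n
      have hlenL : (PySem.List.pyRange 1 n 1).length = (n-1).toNat :=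
        PySem.List.length_pyRange_one 1 n
      have hsum : ((PySem.List.pyRange 1 n 1).map (pvStep vols closes)).sum
          = (P.map (pvStep vols closes)).sum + (Q.map (pvStep vols closes)).sum := by
        rw [hsplit, List.map_append, List.sum_append]
      set arr : List Int := 0 :: pvPartials vols closes 0 (PySem.List.pyRange 1 n 1) with harr
      have harrlen : (arr.length : Int) = n := by
        rw [harr]; simp [pvPartials_length, hlenL]; omega
      -- last element of arr = OBV sum over the whole range
      have hlast : PySem.List.pyGetD arr (-1) 0
          = ((PySem.List.pyRange 1 n 1).map (pvStep vols closes)).sum := by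
        have hne : arr ≠ [] := by rw [harr]; simp
        rw [PySem.List.pyGetD_neg_one arr 0 hne, List.getLast_eq_getElem]
        rw [← List.getD_eq_getElem arr 0 (by omega)]
        by_cases hone : n = 1
        · have hL : PySem.List.pyRange 1 n 1 = [] :=
            PySem.List.pyRange_one_eq_nil (by omega)
          rw [harr]
          simp [hL, pvPartials]
        · obtain ⟨k, hk⟩ : ∃ k, (n-1).toNat = k + 1 := ⟨(n-1).toNat - 1, by omega⟩
          have hidx : arr.length - 1 = k + 1 := by
            rw [harr]; simp [pvPartials_length, hlenL, hk]
          rw [hidx, harr, List.getD_cons_succ]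
          rw [pvPartials_getD _ _ _ _ k (by omega)]
          rw [List.take_of_length_le (by omega)]
          ring
      -- the element 10 back = OBV sum over the prefix P
      have hm : max 0 ((arr.length : Int) - 11) = s - 1 := by omega
      have hprev : PySem.List.pyGetD arr (max 0 ((arr.length : Int) - 11)) 0
          = (P.map (pvStep vols closes)).sum := by
        rw [hm]
        have h0 : (0:Int) ≤ s - 1 := by omega
        have h1 : s - 1 < (arr.length : Int) := by omega
        rw [PySem.List.pyGetD_eq_getElem arr 0 h0 h1]
        rw [← List.getD_eq_getElem arr 0 (by omega)]
        by_cases hse : s = 1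
        · have hPnil : P = [] := by
            rw [hP]; exact PySem.List.pyRange_one_eq_nil (by omega)
          rw [harr]
          simp [hse, hPnil]
        · obtain ⟨k, hk⟩ : ∃ k, (s-1).toNat = k + 1 := ⟨(s-1).toNat - 1, by omega⟩
          rw [hk, harr, List.getD_cons_succ]
          rw [pvPartials_getD _ _ _ _ k (by omega)]
          have htake : (PySem.List.pyRange 1 n 1).take (k+1) = P := by
            rw [hsplit, List.take_append_of_le_length (by omega)]
            exact List.take_of_length_le (by omega)
          rw [htake]; ring
      have e1 : (((PySem.List.pyRange 1 n 1).map (pvStep vols closes)).sum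
            > (P.map (pvStep vols closes)).sum)
          ↔ (0 + (Q.map (pvStep vols closes)).sum > 0) := by
        rw [hsum]; omega
      have e2 : (((PySem.List.pyRange 1 n 1).map (pvStep vols closes)).sum
            < (P.map (pvStep vols closes)).sum)
          ↔ (0 + (Q.map (pvStep vols closes)).sum < 0) := by
        rw [hsum]; omega
      simp only [foldA_eq, foldB_eq, List.singleton_append, ← harr, hlast, hprev, e1, e2]

-- ===== VERDICT (by name: the statement is the Claim_ definition above) =====
theorem calc_obv_spec : Claim_equal_calc_obv := by
  intro vols closes _ _
  unfold Spec_calc_obv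
  exact calc_obv_eq_alt vols closes
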